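-- pv_equiv track=rewrite | github.com/drifterDev/algoritmos | codeforces/python2.py | calculate_max_waiting_time
-- ===== SOURCE A (Python) =====
-- def calculate_max_waiting_time(n, patterns):
--     patterns.sort()
--     frequency = [0] * (patterns[-1] + 2)
--
--     for pattern in patterns:
--         frequency[pattern] += 1
--
--     prefix_sum = [0] * (patterns[-1] + 2)
--     for i in range(1, patterns[-1] + 2):
--         prefix_sum[i] = prefix_sum[i - 1] + frequency[i]
--
--     min_waiting_time = float('inf')
--     for i in range(patterns[-1] + 1):
--         waiting_time = prefix_sum[i] + (n - prefix_sum[-1] + prefix_sum[i])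
--         min_waiting_time = min(min_waiting_time, waiting_time)
--
--     return min_waiting_time
-- ===== SOURCE B (Python) =====
-- # B: closed form. The prefix sums are nondecreasing and start at 0, so the minimum
-- # waiting time is n minus the number of positive patterns (a single count).
-- # (A also sorts its list argument in place; B does not.)
-- def calculate_max_waiting_time(n, patterns):
--     return n - sum(1 for p in patterns if p >= 1)
-- ===== Notes on version B (the rewrite author's own statement) =====
-- stated objective: simpler
-- what changed: Replaced the frequency array, the prefix-sum array and the scan for the minimum by a single count: the prefix sums are nondecreasing with value 0 at index 0, so the minimum waiting time is n minus the number of positive patterns.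
-- outside the precondition, e.g. on calculate_max_waiting_time(5, []): A raises IndexError, B returns 5; on calculate_max_waiting_time(5, [-10, 3]): A raises IndexError, B returns 4; on calculate_max_waiting_time(5, [-1]): A returns inf, B returns 5
import Mathlib
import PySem

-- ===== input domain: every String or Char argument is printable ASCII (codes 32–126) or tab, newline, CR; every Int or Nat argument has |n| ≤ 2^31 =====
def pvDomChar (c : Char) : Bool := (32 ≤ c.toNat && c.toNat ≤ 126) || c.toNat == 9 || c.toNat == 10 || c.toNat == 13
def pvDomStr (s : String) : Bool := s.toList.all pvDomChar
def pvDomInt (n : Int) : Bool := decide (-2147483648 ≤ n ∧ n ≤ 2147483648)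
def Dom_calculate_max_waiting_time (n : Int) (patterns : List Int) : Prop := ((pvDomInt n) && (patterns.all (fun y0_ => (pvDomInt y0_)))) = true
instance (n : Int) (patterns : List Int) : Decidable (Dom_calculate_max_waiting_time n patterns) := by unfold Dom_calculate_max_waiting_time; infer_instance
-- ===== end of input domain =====

-- B replaces A's frequency/prefix-sum scan by a single count of the positive patterns (simpler).
-- A sorts its list argument in place; the equivalence proved here is about the return value only.

-- ===== PORT A =====
def calculate_max_waiting_time (n : Int) (patterns : List Int) : Int :=
  -- patterns.sort()
  let s := PySem.List.sorted patterns (fun x => x) false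
  -- patterns[-1] (IndexError on [] is excluded by Pre_)
  let last := PySem.List.pyGetD s (-1) 0
  -- frequency = [0] * (patterns[-1] + 2)
  let frequency := List.replicate (last + 2).toNat (0 : Int)
  -- for pattern in patterns: frequency[pattern] += 1
  let frequency := s.foldl
    (fun f p => PySem.List.pySetD f p (PySem.List.pyGetD f p 0 + 1)) frequency
  -- prefix_sum = [0] * (patterns[-1] + 2); for i in range(1, patterns[-1] + 2): …
  let prefix_sum := List.replicate (last + 2).toNat (0 : Int)
  let prefix_sum := (PySem.List.pyRange 1 (last + 2) 1).foldl
    (fun ps i =>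
      PySem.List.pySetD ps i
        (PySem.List.pyGetD ps (i - 1) 0 + PySem.List.pyGetD frequency i 0)) prefix_sum
  -- min_waiting_time = float('inf'); for i in range(patterns[-1] + 1): … (none models inf)
  let res := (PySem.List.pyRange 0 (last + 1) 1).foldl
    (fun (acc : Option Int) i =>
      let w := PySem.List.pyGetD prefix_sum i 0 +
        (n - PySem.List.pyGetD prefix_sum (-1) 0 + PySem.List.pyGetD prefix_sum i 0)
      match acc with
      | none => some w
      | some v => some (min v w)) none
  res.getD 0

-- ===== PORT B =====
def calculate_max_waiting_time_alt (n : Int) (patterns : List Int) : Int :=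
  n - (patterns.countP (fun p => decide (1 ≤ p)) : Int)

-- ===== PRECONDITION & SPEC =====
-- Pre_ restricts to the natural domain: a nonempty list of NONNEGATIVE pattern values.
-- On [] A raises IndexError; a negative value is indexed through Python's negative-index
-- wraparound (IndexError below -(max+2), an arbitrary frequency slot otherwise), an
-- artefact of A's frequency-array indexing outside the task's natural domain.
def Pre_calculate_max_waiting_time (n : Int) (patterns : List Int) : Prop :=
  patterns ≠ [] ∧ ∀ p ∈ patterns, 0 ≤ p

instance (n : Int) (patterns : List Int) : Decidable (Pre_calculate_max_waiting_time n patterns) := by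
  unfold Pre_calculate_max_waiting_time; infer_instance

def pvWitness_calculate_max_waiting_time : Int × List Int := (7, [1, 2, 2, 5])

def Spec_calculate_max_waiting_time (n : Int) (patterns : List Int) (out : Int) : Prop := out = calculate_max_waiting_time_alt n patterns
instance (n : Int) (patterns : List Int) (out : Int) : Decidable (Spec_calculate_max_waiting_time n patterns out) := by unfold Spec_calculate_max_waiting_time; infer_instance

-- ===== CLAIM (what is proved, stated in full; the proofs are below) =====
def Claim_equal_calculate_max_waiting_time : Prop := ∀ (n : Int) (patterns : List Int), Dom_calculate_max_waiting_time n patterns → Pre_calculate_max_waiting_time n patterns → Spec_calculate_max_waiting_time n patterns (calculate_max_waiting_time n patterns)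

-- ===== LEMMAS AND PROOFS =====

-- step function of A's frequency loop
def stepF (f : List Int) (p : Int) : List Int :=
  PySem.List.pySetD f p (PySem.List.pyGetD f p 0 + 1)

-- the index Python's wraparound actually writes to
def wIdx (L : Nat) (p : Int) : Nat := if p < 0 then (p + L).toNat else p.toNat

lemma pyIdx?_wrap (L : Nat) (p : Int) (h1 : -(L : Int) ≤ p) (h2 : p < (L : Int)) :
    PySem.List.pyIdx? L p = some (wIdx L p) := by
  unfold PySem.List.pyIdx? wIdx
  split_ifs <;> simp only [Option.some_inj] <;> omega

lemma wIdx_lt (L : Nat) (p : Int) (h1 : -(L : Int) ≤ p) (h2 : p < (L : Int)) :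
    wIdx L p < L := by
  unfold wIdx; split_ifs <;> omega

lemma pyGetD_wrap (f : List Int) (p : Int) (h1 : -(f.length : Int) ≤ p)
    (h2 : p < (f.length : Int)) :
    PySem.List.pyGetD f p 0 = f.getD (wIdx f.length p) 0 := by
  unfold PySem.List.pyGetD PySem.List.pyGet?
  rw [pyIdx?_wrap _ _ h1 h2, Option.bind_some, List.getD_eq_getElem?_getD]

lemma stepF_wrap (f : List Int) (p : Int) (h1 : -(f.length : Int) ≤ p)
    (h2 : p < (f.length : Int)) :
    stepF f p = f.set (wIdx f.length p) (f.getD (wIdx f.length p) 0 + 1) := by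
  unfold stepF PySem.List.pySetD PySem.List.pySet?
  rw [pyIdx?_wrap _ _ h1 h2, pyGetD_wrap f p h1 h2, Option.map_some, Option.getD_some]

lemma foldl_stepF_get (l : List Int) (f : List Int)
    (hl : ∀ p ∈ l, -(f.length : Int) ≤ p ∧ p < (f.length : Int)) (j : Nat)
    (hj : j < f.length) :
    (l.foldl stepF f).getD j 0 =
      f.getD j 0 + ((l.countP (fun p => wIdx f.length p = j)) : Int) := by
  induction l generalizing f with
  | nil => simp
  | cons p t ih =>
      obtain ⟨hp1, hp2⟩ := hl p (by simp)
      have hw : wIdx f.length p < f.length := wIdx_lt _ _ hp1 hp2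
      have hset : (stepF f p).length = f.length := by
        rw [stepF_wrap f p hp1 hp2, List.length_set]
      rw [List.foldl_cons, ih (stepF f p) (fun q hq => hset ▸ hl q (by simp [hq])) (hset ▸ hj),
        List.countP_cons]
      have hgd : (stepF f p).getD j 0 =
          if wIdx f.length p = j then f.getD j 0 + 1 else f.getD j 0 := by
        rw [stepF_wrap f p hp1 hp2]
        by_cases h : wIdx f.length p = j
        · rw [if_pos h, h, List.getD_eq_getElem?_getD, List.getElem?_set_self (h ▸ hw),
            List.getD_eq_getElem?_getD]
          simp
        · rw [if_neg h, List.getD_eq_getElem?_getD, List.getElem?_set_ne h,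
            List.getD_eq_getElem?_getD]
      rw [hgd]
      simp only [hset]
      by_cases h : wIdx f.length p = j <;> simp [h] <;> omega

-- step function of A's prefix-sum loop (frequency list fixed)
def stepP (Fl : List Int) (ps : List Int) (i : Int) : List Int :=
  PySem.List.pySetD ps i
    (PySem.List.pyGetD ps (i - 1) 0 + PySem.List.pyGetD Fl i 0)

-- the value A's prefix_sum holds at index k after the loop
def Pacc (Fl : List Int) : Nat → Int
  | 0 => 0
  | k + 1 => Pacc Fl k + PySem.List.pyGetD Fl ((k : Int) + 1) 0

lemma getD_replicate_zero (Ln j : Nat) :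
    PySem.List.pyGetD (List.replicate Ln (0 : Int)) (j : Int) 0 = 0 := by
  rw [PySem.List.pyGetD_natCast]
  rcases lt_or_ge j Ln with h | h
  · simp [List.getD_eq_getElem?_getD, h]
  · rw [List.getD_eq_getElem?_getD,
      List.getElem?_eq_none (show (List.replicate Ln (0:Int)).length ≤ j by simpa using h)]
    rfl

lemma prefix_inv (Fl : List Int) (Ln : Nat) (k : Nat) (hk : k < Ln) :
    ((PySem.List.pyRange 1 (1 + (k : Int)) 1).foldl (stepP Fl)
        (List.replicate Ln (0 : Int))).length = Ln ∧
      ∀ j : Nat, j ≤ k →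
        PySem.List.pyGetD
          ((PySem.List.pyRange 1 (1 + (k : Int)) 1).foldl (stepP Fl)
            (List.replicate Ln (0 : Int))) (j : Int) 0 = Pacc Fl j := by
  induction k with
  | zero =>
      rw [PySem.List.pyRange_one_eq_nil (by omega)]
      refine ⟨by simp, ?_⟩
      intro j hj
      interval_cases j
      simpa [Pacc] using getD_replicate_zero Ln 0
  | succ k ih =>
      obtain ⟨ihlen, ihget⟩ := ih (by omega)
      have hsplit : PySem.List.pyRange 1 (1 + ((k : Int) + 1)) 1 =
          PySem.List.pyRange 1 (1 + (k : Int)) 1 ++ [1 + (k : Int)] := by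
        rw [show 1 + ((k : Int) + 1) = (1 + (k : Int)) + 1 by ring]
        exact PySem.List.pyRange_one_succ_right (by omega)
      push_cast
      rw [hsplit, List.foldl_append, List.foldl_cons, List.foldl_nil]
      set psk := (PySem.List.pyRange 1 (1 + (k : Int)) 1).foldl (stepP Fl)
        (List.replicate Ln (0 : Int)) with hpsk
      have hstep : stepP Fl psk (1 + (k : Int)) =
          PySem.List.pySetD psk (((k + 1 : Nat) : Int)) (Pacc Fl (k + 1)) := by
        unfold stepP
        rw [show (1 + (k : Int)) - 1 = ((k : Nat) : Int) by ring,
          ihget k (le_refl k),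
          show (1 + (k : Int)) = (((k + 1 : Nat) : Nat) : Int) by push_cast; ring]
        rfl
      rw [hstep]
      constructor
      · rw [PySem.List.length_pySetD]; exact ihlen
      · intro j hj
        rw [PySem.List.pyGetD_pySetD_natCast psk (k+1) j _ 0 (by omega)]
        by_cases h : j = k + 1
        · rw [if_pos h, h]
        · rw [if_neg h]; exact ihget j (by omega)

lemma foldl_min_ge (g : Int → Int) (r : List Int) (v : Int) (h : ∀ i ∈ r, v ≤ g i) :
    r.foldl (fun (acc : Option Int) i =>
      match acc with
      | none => some (g i)
      | some u => some (min u (g i))) (some v) = some v := by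
  induction r with
  | nil => rfl
  | cons i t ih =>
      rw [List.foldl_cons]
      show t.foldl _ (some (min v (g i))) = some v
      rw [min_eq_left (h i (by simp))]
      exact ih (fun x hx => h x (by simp [hx]))

lemma countP_wsucc (l : List Int) (g : Int → Nat) (k : Nat) :
    l.countP (fun p => decide (1 ≤ g p ∧ g p ≤ k + 1)) =
      l.countP (fun p => decide (1 ≤ g p ∧ g p ≤ k)) +
        l.countP (fun p => decide (g p = k + 1)) := by
  induction l with
  | nil => rfl
  | cons p t ih =>
      simp only [List.countP_cons, ih, decide_eq_true_eq]
      split_ifs <;> omega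

lemma pairwise_le_getLast (L : List Int) (h : L ≠ []) (hp : L.Pairwise (· ≤ ·)) :
    ∀ p ∈ L, p ≤ L.getLast h := by
  induction L with
  | nil => exact absurd rfl h
  | cons a t ih =>
      rw [List.pairwise_cons] at hp
      intro p hpmem
      cases t with
      | nil =>
          rw [List.mem_singleton] at hpmem
          simp [hpmem, List.getLast]
      | cons b u =>
          rw [List.getLast_cons (by simp)]
          rcases List.mem_cons.mp hpmem with rfl | hp2
          · exact hp.1 _ (List.getLast_mem (by simp))
          · exact ih (by simp) hp.2 p hp2

lemma Pacc_count (Fl s : List Int) (Ln : Nat)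
    (hF : ∀ t : Nat, t < Ln → PySem.List.pyGetD Fl (t : Int) 0 =
      (s.countP (fun p => decide (wIdx Ln p = t)) : Int)) :
    ∀ k : Nat, k < Ln →
      Pacc Fl k = (s.countP (fun p => decide (1 ≤ wIdx Ln p ∧ wIdx Ln p ≤ k)) : Int) := by
  intro k
  induction k with
  | zero =>
      intro _
      rw [List.countP_eq_zero.mpr (by intro p _; simp; omega)]
      rfl
  | succ k ih =>
      intro hk
      show Pacc Fl k + PySem.List.pyGetD Fl ((k : Int) + 1) 0 = _
      rw [ih (by omega),
        show ((k : Int) + 1) = (((k + 1 : Nat) : Nat) : Int) by push_cast; ring,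
        hF (k + 1) hk, countP_wsucc s (wIdx Ln) k]
      push_cast
      ring

-- A's closed-form value on its whole returning domain:
-- n - len + (number of values the frequency window never counts)
theorem calc_formula (n : Int) (patterns : List Int) (hne : patterns ≠ [])
    (hM0 : 0 ≤ patterns.max?.getD 0)
    (hlo : ∀ p ∈ patterns, -(patterns.max?.getD 0 + 2) ≤ p) :
    calculate_max_waiting_time n patterns =
      n - patterns.length +
        (patterns.countP
          (fun p => decide (p = 0 ∨ p = -(patterns.max?.getD 0 + 2))) : Int) := by
  obtain ⟨M, hMsome⟩ : ∃ M, patterns.max? = some M := by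
    cases h : patterns.max? with
    | none => exact absurd (List.max?_eq_none_iff.mp h) hne
    | some M => exact ⟨M, rfl⟩
  obtain ⟨hMmem, hMub⟩ := List.max?_eq_some_iff.mp hMsome
  rw [hMsome] at hM0 hlo ⊢
  simp only [Option.getD_some] at hM0 hlo ⊢
  simp only [calculate_max_waiting_time]
  set s := PySem.List.sorted patterns (fun x => x) false with hs
  have hsne : s ≠ [] := by
    rw [hs, Ne, PySem.List.sorted_eq_nil_iff]; exact hne
  have hmemiff : ∀ p, p ∈ s ↔ p ∈ patterns := fun p =>
    hs ▸ PySem.List.mem_sorted patterns (fun x => x) false p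
  have hpair : s.Pairwise (· ≤ ·) := hs ▸ PySem.List.sorted_pairwise patterns (fun x => x)
  set m := s.getLast hsne with hm
  have hlast : PySem.List.pyGetD s (-1) 0 = m := PySem.List.pyGetD_neg_one s 0 hsne
  rw [hlast]
  have hmax : ∀ p ∈ s, p ≤ m := pairwise_le_getLast s hsne hpair
  have hmM : m = M := le_antisymm
    (hMub m ((hmemiff m).mp (List.getLast_mem hsne)))
    (hmax M ((hmemiff M).mpr hMmem))
  have hm0 : 0 ≤ m := hmM ▸ hM0
  have hlo' : ∀ p ∈ s, -(m + 2) ≤ p := fun p hp =>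
    hmM ▸ hlo p ((hmemiff p).mp hp)
  set Ln := (m + 2).toNat with hLndef
  have hLnm : (Ln : Int) = m + 2 := Int.toNat_of_nonneg (by omega)
  have hstepF : (fun f p => PySem.List.pySetD f p (PySem.List.pyGetD f p 0 + 1)) = stepF := rfl
  rw [hstepF]
  set Fl := s.foldl stepF (List.replicate Ln (0 : Int)) with hFldef
  have hFget : ∀ t : Nat, t < Ln → PySem.List.pyGetD Fl (t : Int) 0 =
      (s.countP (fun p => decide (wIdx Ln p = t)) : Int) := by
    intro t ht
    have hb : ∀ p ∈ s, -((List.replicate Ln (0:Int)).length : Int) ≤ p ∧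
        p < ((List.replicate Ln (0:Int)).length : Int) := by
      intro p hp
      rw [List.length_replicate, hLnm]
      exact ⟨by have := hlo' p hp; omega, by have := hmax p hp; omega⟩
    have := foldl_stepF_get s (List.replicate Ln (0 : Int)) hb t
      (by rw [List.length_replicate]; exact ht)
    rw [List.length_replicate] at this
    rw [PySem.List.pyGetD_natCast, hFldef, this]
    have h0 := getD_replicate_zero Ln t
    rw [PySem.List.pyGetD_natCast] at h0
    rw [h0]
    ring
  have hstepP : (fun ps i => PySem.List.pySetD ps i
      (PySem.List.pyGetD ps (i - 1) 0 + PySem.List.pyGetD Fl i 0)) = stepP Fl := rfl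
  rw [hstepP]
  have hrange : PySem.List.pyRange 1 (m + 2) 1 =
      PySem.List.pyRange 1 (1 + (((m + 1).toNat : Nat) : Int)) 1 := by
    congr 1
    omega
  rw [hrange]
  obtain ⟨hpslen, hpsget⟩ := prefix_inv Fl Ln (m + 1).toNat (by omega)
  set ps := (PySem.List.pyRange 1 (1 + (((m + 1).toNat : Nat) : Int)) 1).foldl (stepP Fl)
      (List.replicate Ln (0 : Int)) with hpsdef
  have hpsne : ps ≠ [] := List.ne_nil_of_length_pos (by rw [hpslen]; omega)
  -- the total A subtracts: every pattern except the ones wIdx sends to slot 0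
  have hcount_top : s.countP (fun p => decide (1 ≤ wIdx Ln p ∧ wIdx Ln p ≤ (m + 1).toNat))
      = s.countP (fun p => decide (¬ (p = 0 ∨ p = -(m + 2)))) := by
    apply List.countP_congr
    intro p hp
    have h1 := hlo' p hp
    have h2 := hmax p hp
    simp only [decide_eq_true_eq]
    unfold wIdx
    split_ifs <;> omega
  have hT : PySem.List.pyGetD ps (-1) 0 =
      (s.countP (fun p => decide (¬ (p = 0 ∨ p = -(m + 2)))) : Int) := by
    rw [PySem.List.pyGetD_neg_one ps 0 hpsne, List.getLast_eq_getElem]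
    have hlt : (m + 1).toNat < ps.length := by rw [hpslen]; omega
    have h2 := hpsget (m + 1).toNat (le_refl _)
    rw [PySem.List.pyGetD_natCast, List.getD_eq_getElem _ _ hlt] at h2
    have hidx : ps.length - 1 = (m + 1).toNat := by rw [hpslen]; omega
    simp only [hidx]
    rw [h2, Pacc_count Fl s Ln hFget (m + 1).toNat (by omega), hcount_top]
  have hps0 : PySem.List.pyGetD ps 0 0 = 0 := by
    have h0 := hpsget 0 (Nat.zero_le _)
    simpa [Pacc] using h0
  simp only [hT]
  set T := (s.countP (fun p => decide (¬ (p = 0 ∨ p = -(m + 2)))) : Int) with hTdef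
  rw [PySem.List.pyRange_one_cons (show (0 : Int) < m + 1 by omega), List.foldl_cons]
  show ((PySem.List.pyRange 1 (m + 1) 1).foldl
      (fun (acc : Option Int) i =>
        match acc with
        | none => some (PySem.List.pyGetD ps i 0 + (n - T + PySem.List.pyGetD ps i 0))
        | some u => some (min u (PySem.List.pyGetD ps i 0 + (n - T + PySem.List.pyGetD ps i 0))))
      (some (PySem.List.pyGetD ps 0 0 + (n - T + PySem.List.pyGetD ps 0 0)))).getD 0
      = n - (patterns.length : Int) +
        (patterns.countP (fun p => decide (p = 0 ∨ p = -(M + 2))) : Int)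
  rw [hps0, show (0 : Int) + (n - T + 0) = n - T by ring]
  have hnonneg : ∀ i ∈ PySem.List.pyRange 1 (m + 1) 1,
      n - T ≤ PySem.List.pyGetD ps i 0 + (n - T + PySem.List.pyGetD ps i 0) := by
    intro i hi
    rw [PySem.List.mem_pyRange_one] at hi
    have hP : PySem.List.pyGetD ps i 0 = Pacc Fl i.toNat := by
      rw [show i = ((i.toNat : Nat) : Int) by omega]
      exact hpsget i.toNat (by omega)
    have hP0 : 0 ≤ Pacc Fl i.toNat := by
      rw [Pacc_count Fl s Ln hFget i.toNat (by omega)]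
      exact Int.natCast_nonneg _
    rw [hP]
    linarith
  rw [foldl_min_ge
    (fun i => PySem.List.pyGetD ps i 0 + (n - T + PySem.List.pyGetD ps i 0))
    (PySem.List.pyRange 1 (m + 1) 1) (n - T) hnonneg, Option.getD_some]
  -- n - T = n - len + (count of the values slot 0 swallows)
  have hsplitlen : s.length =
      s.countP (fun p => decide (p = 0 ∨ p = -(m + 2))) +
        s.countP (fun p => decide (¬ (p = 0 ∨ p = -(m + 2)))) := by
    simpa using List.length_eq_countP_add_countP
      (fun p => decide (p = 0 ∨ p = -(m + 2))) (l := s)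
  have hsl : s.length = patterns.length := by
    rw [hs]
    exact PySem.List.length_sorted patterns (fun x => x) false
  have hcp : s.countP (fun p => decide (p = 0 ∨ p = -(m + 2))) =
      patterns.countP (fun p => decide (p = 0 ∨ p = -(M + 2))) := by
    rw [hmM]
    exact List.Perm.countP_eq _ (hs ▸ PySem.List.sorted_perm patterns (fun x => x) false)
  rw [hTdef]
  omega

-- ===== VERDICT (by name: the statement is the Claim_ definition above) =====
theorem calculate_max_waiting_time_spec : Claim_equal_calculate_max_waiting_time := by
  intro n patterns _ hpre
  obtain ⟨hne, hnn⟩ := hpre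
  have hM0 : 0 ≤ patterns.max?.getD 0 := by
    cases h : patterns.max? with
    | none => exact absurd (List.max?_eq_none_iff.mp h) hne
    | some M =>
        obtain ⟨hMmem, _⟩ := List.max?_eq_some_iff.mp h
        simpa using hnn M hMmem
  have hlo : ∀ p ∈ patterns, -(patterns.max?.getD 0 + 2) ≤ p := by
    intro p hp
    have := hnn p hp
    omega
  show calculate_max_waiting_time n patterns =
    n - (patterns.countP (fun p => decide (1 ≤ p)) : Int)
  rw [calc_formula n patterns hne hM0 hlo]
  have hsplit := List.length_eq_countP_add_countP (fun p : Int => decide (1 ≤ p))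
    (l := patterns)
  have hcongr : patterns.countP
      (fun p => decide (p = 0 ∨ p = -(patterns.max?.getD 0 + 2))) =
      patterns.countP (fun a => decide ¬(decide (1 ≤ a) = true)) := by
    apply List.countP_congr
    intro p hp
    have h1 := hnn p hp
    simp only [decide_eq_true_eq]
    omega
  rw [hcongr]
  omega
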